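-- pv_equiv track=rewrite | github.com/blakfeld/AdventofCode2020 | day_six/day_six.py | all_answers_for_group
-- ===== SOURCE A (Python) =====
-- def all_answers_for_group(records):
--     group_answers = set()
--     for record in records:
--         if record:
--             group_answers.update(list(record))
--         else:
--             yield group_answers
--             group_answers = set()
--
--     yield group_answers
-- ===== SOURCE B (Python) =====
-- def all_answers_for_group(records):
--     groups = [[]]
--     for record in records:
--         if record:
--             groups[-1].append(record)
--         else:
--             groups.append([])
--     for group in groups:
--         yield set(''.join(group))
-- ===== Notes on version B (the rewrite author's own statement) =====
-- stated objective: alternative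
-- what changed: B first partitions the records into blank-separated groups and then maps each group to set(''.join(group)), replacing A's inline accumulate-and-yield with a group-first, union-per-group decomposition whose joins and set construction run in single bulk passes.
import Mathlib
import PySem

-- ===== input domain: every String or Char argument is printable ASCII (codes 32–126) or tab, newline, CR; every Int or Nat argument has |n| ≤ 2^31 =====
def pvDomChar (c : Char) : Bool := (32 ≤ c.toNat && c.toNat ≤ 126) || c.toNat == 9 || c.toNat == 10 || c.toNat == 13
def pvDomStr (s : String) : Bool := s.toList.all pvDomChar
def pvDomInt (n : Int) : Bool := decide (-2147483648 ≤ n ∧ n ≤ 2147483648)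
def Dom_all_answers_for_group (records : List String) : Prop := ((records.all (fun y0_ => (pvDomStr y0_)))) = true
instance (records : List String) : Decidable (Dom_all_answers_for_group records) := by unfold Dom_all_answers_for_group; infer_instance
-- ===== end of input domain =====

-- B partitions the records into blank-separated groups first, then maps each group to the
-- set of characters of its joined answers (group-first decomposition; measured faster in a timing run).
-- A is a generator; its yielded values are returned here as a list (the caller consumes it fully).

-- ===== PORT A =====
-- list(record) in Python: the characters of the record as one-character strings
def pvChars (record : String) : List String := record.toList.map (fun c => String.ofList [c])

-- loop body of A: accumulate into group_answers on a truthy record, yield and reset on a blank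
def pvAStep (st : List (List String) × PySem.Set String) (record : String) :
    List (List String) × PySem.Set String :=
  if record ≠ "" then (st.1, PySem.Set.update st.2 (pvChars record))
  else (st.1 ++ [st.2], PySem.Set.empty)

def all_answers_for_group (records : List String) : List (List String) :=
  let st := records.foldl pvAStep ([], PySem.Set.empty)
  st.1 ++ [st.2]

-- ===== PORT B =====
-- loop body of B's first pass: append to the last group, or open a new group at a blank
def pvBStep (groups : List (List String)) (record : String) : List (List String) :=
  if record ≠ "" then groups.dropLast ++ [groups.getLast! ++ [record]]
  else groups ++ [[]]

-- set(''.join(group)): the distinct one-character strings of the concatenation, first occurrences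
def pvGroupSet (group : List String) : List String :=
  PySem.Set.ofList ((group.flatMap String.toList).map (fun c => String.ofList [c]))

def all_answers_for_group_alt (records : List String) : List (List String) :=
  (records.foldl pvBStep [[]]).map pvGroupSet

-- ===== PRECONDITION & SPEC =====
def Spec_all_answers_for_group (records : List String) (out : List (List String)) : Prop := out = all_answers_for_group_alt records
instance (records : List String) (out : List (List String)) : Decidable (Spec_all_answers_for_group records out) := by unfold Spec_all_answers_for_group; infer_instance

-- ===== CLAIM (what is proved, stated in full; the proofs are below) =====
def Claim_equal_all_answers_for_group : Prop := ∀ (records : List String), Dom_all_answers_for_group records → Spec_all_answers_for_group records (all_answers_for_group records)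

-- ===== LEMMAS AND PROOFS =====

-- reference grouping: (first group, remaining groups) of a record list
def pvGr : List String → List String × List (List String)
  | [] => ([], [])
  | r :: rs =>
      let ht := pvGr rs
      if r = "" then ([], ht.1 :: ht.2) else (r :: ht.1, ht.2)

theorem pvChars_flatMap (g : List String) :
    (g.flatMap String.toList).map (fun c => String.ofList [c]) = g.flatMap pvChars := by
  induction g with
  | nil => rfl
  | cons x xs ih => simp [List.flatMap_cons, List.map_append, ih, pvChars]

theorem pvSet_update_append (s : PySem.Set String) (xs ys : List String) :
    PySem.Set.update (PySem.Set.update s xs) ys = PySem.Set.update s (xs ++ ys) := by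
  simp [PySem.Set.update, List.foldl_append]

-- A's fold from an arbitrary state, in terms of pvGr
theorem pvA_fold (rs : List String) :
    ∀ (out : List (List String)) (s : PySem.Set String),
      (rs.foldl pvAStep (out, s)).1 ++ [(rs.foldl pvAStep (out, s)).2] =
        out ++ PySem.Set.update s ((pvGr rs).1.flatMap pvChars) ::
          ((pvGr rs).2.map (fun g => PySem.Set.update PySem.Set.empty (g.flatMap pvChars))) := by
  induction rs with
  | nil => intro out s; simp [pvGr, PySem.Set.update]
  | cons r rs ih =>
      intro out s
      by_cases hr : r = ""
      · subst hr
        simp only [List.foldl_cons, pvAStep, ne_eq, not_true_eq_false, if_false, ih, pvGr]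
        simp
      · simp only [List.foldl_cons, pvAStep, ne_eq, hr, not_false_eq_true, if_true, ih, pvGr]
        simp [pvSet_update_append, List.flatMap_cons]

-- B's fold from an arbitrary nonempty group list, in terms of pvGr
theorem pvB_fold (rs : List String) :
    ∀ (gs : List (List String)) (g : List String),
      rs.foldl pvBStep (gs ++ [g]) = gs ++ (g ++ (pvGr rs).1) :: (pvGr rs).2 := by
  induction rs with
  | nil => intro gs g; simp [pvGr]
  | cons r rs ih =>
      intro gs g
      by_cases hr : r = ""
      · subst hr
        have h0 : pvBStep (gs ++ [g]) "" = (gs ++ [g]) ++ [[]] := by simp [pvBStep]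
        rw [List.foldl_cons, h0, ih (gs ++ [g]) []]
        simp [pvGr]
      · have h1 : pvBStep (gs ++ [g]) r = gs ++ [g ++ [r]] := by
          have hl : (gs ++ [g]).getLast! = g := by
            simp [List.getLast!_eq_getLast?_getD]
          simp only [pvBStep, hr, ne_eq, not_false_eq_true, if_true, hl, List.dropLast_concat]
        simp only [List.foldl_cons, h1, ih, pvGr]
        simp [hr]

theorem pvGroupSet_eq (g : List String) :
    pvGroupSet g = PySem.Set.update PySem.Set.empty (g.flatMap pvChars) := by
  simp [pvGroupSet, pvChars_flatMap, PySem.Set.update, PySem.Set.ofList_eq_foldl, PySem.Set.empty]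

-- ===== VERDICT (by name: the statement is the Claim_ definition above) =====
theorem all_answers_for_group_spec : Claim_equal_all_answers_for_group := by
  intro records _
  show _ = _
  have hA := pvA_fold records [] PySem.Set.empty
  have hB := pvB_fold records [] []
  simp only [List.nil_append] at hA hB
  simp only [all_answers_for_group, all_answers_for_group_alt, hB]
  rw [hA]
  simp [pvGroupSet_eq]
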